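-- pv_equiv track=rewrite | github.com/xeroceph/pihole-alerts | mon.py | searchQueries
-- ===== SOURCE A (Python) =====
-- def searchQueries(queries, blacklist):
--     result = {}
--     for x in blacklist:
--         hits = 0
--         for i in queries:
--             for n in queries[i]:
--                 if x in n:
--                     hits += 1
--                     result[x] = hits
--     return result
-- ===== SOURCE B (Python) =====
-- def searchQueries(queries, blacklist):
--     # Inverted matching: enumerate the substrings of each text once and hash-look
--     # them up in the pattern set, instead of scanning every text per pattern.
--     wanted = set(blacklist)
--     counts = {}
--     for texts in queries.values():
--         for n in texts:
--             subs = {n[i:j] for i in range(len(n) + 1) for j in range(i, len(n) + 1)}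
--             for s in subs:
--                 if s in wanted:
--                     counts[s] = counts.get(s, 0) + 1
--     return {x: counts[x] for x in dict.fromkeys(blacklist) if x in counts}
-- ===== Notes on version B (the rewrite author's own statement) =====
-- stated objective: faster
-- what changed: B inverts the matching direction: instead of scanning every text once per blacklist pattern with a substring search, it enumerates the substring set of each text once and hash-looks each substring up in a set built from the patterns, accumulating per-pattern counters in one text-major pass and emitting the result dict in blacklist order.
import Mathlib
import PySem

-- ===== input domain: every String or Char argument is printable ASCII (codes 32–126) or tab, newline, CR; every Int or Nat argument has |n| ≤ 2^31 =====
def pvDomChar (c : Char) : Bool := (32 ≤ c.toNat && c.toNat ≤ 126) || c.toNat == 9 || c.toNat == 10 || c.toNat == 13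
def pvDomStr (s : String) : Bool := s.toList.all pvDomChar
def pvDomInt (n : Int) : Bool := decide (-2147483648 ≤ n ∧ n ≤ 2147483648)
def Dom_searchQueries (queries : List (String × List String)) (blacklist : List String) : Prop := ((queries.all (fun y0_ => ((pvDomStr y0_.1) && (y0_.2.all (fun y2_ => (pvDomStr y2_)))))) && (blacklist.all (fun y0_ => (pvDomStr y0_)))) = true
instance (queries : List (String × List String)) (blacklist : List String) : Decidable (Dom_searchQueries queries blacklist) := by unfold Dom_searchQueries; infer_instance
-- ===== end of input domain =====

-- B inverts the matching direction: it enumerates each text's substring set once and hash-looks substrings up in a set of the blacklist patterns, removing the per-pattern scan over all texts (return value proved equal; a timing run measured B faster on the generated inputs).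


-- ===== PORT A =====
def searchQueries (queries : List (String × List String)) (blacklist : List String) : List (String × Int) :=
  let q := PySem.Dict.ofList queries
  (blacklist.foldl (fun (result : PySem.Dict String Int) x =>
      ((q.keys).foldl (fun (st : Int × PySem.Dict String Int) i =>
          (q.getD i []).foldl (fun st n =>
              if PySem.Str.isIn x n then (st.1 + 1, st.2.insert x (st.1 + 1)) else st) st)
        ((0 : Int), result)).2)
    PySem.Dict.empty).items

-- ===== PORT B =====
-- the set comprehension {n[i:j] for i in range(len(n)+1) for j in range(i, len(n)+1)}
def pySubs (n : String) : List String :=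
  (PySem.List.pyRange 0 ((PySem.Str.len n : Int) + 1) 1).flatMap (fun i =>
    (PySem.List.pyRange i ((PySem.Str.len n : Int) + 1) 1).map (fun j =>
      PySem.Str.slice n (some i) (some j)))

def searchQueries_alt (queries : List (String × List String)) (blacklist : List String) : List (String × Int) :=
  let q := PySem.Dict.ofList queries
  let wanted := PySem.Set.ofList blacklist
  let counts := q.values.foldl (fun (d : PySem.Dict String Int) texts =>
      texts.foldl (fun d n =>
          (PySem.Set.ofList (pySubs n)).foldl (fun d s =>
              if PySem.Set.contains wanted s then d.insert s (d.getD s 0 + 1) else d) d) d)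
    PySem.Dict.empty
  -- counts[x] is guarded by 'x in counts', so getD never sees a missing key
  ((PySem.List.dedup blacklist).foldl (fun (r : PySem.Dict String Int) x =>
      if counts.contains x then r.insert x (counts.getD x 0) else r)
    PySem.Dict.empty).items

-- ===== PRECONDITION & SPEC =====
def Spec_searchQueries (queries : List (String × List String)) (blacklist : List String) (out : List (String × Int)) : Prop := out = searchQueries_alt queries blacklist
instance (queries : List (String × List String)) (blacklist : List String) (out : List (String × Int)) : Decidable (Spec_searchQueries queries blacklist out) := by unfold Spec_searchQueries; infer_instance

-- ===== CLAIM (what is proved, stated in full; the proofs are below) =====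
def Claim_equal_searchQueries : Prop := ∀ (queries : List (String × List String)) (blacklist : List String), Dom_searchQueries queries blacklist → Spec_searchQueries queries blacklist (searchQueries queries blacklist)

-- ===== LEMMAS AND PROOFS =====

def hitCount (T : List String) (x : String) : Int :=
  (T.countP (fun n => PySem.Str.isIn x n) : Int)
theorem hitCount_nonneg (T : List String) (x : String) : 0 ≤ hitCount T x :=
  Int.natCast_nonneg _

def stepA (T : List String) (r : PySem.Dict String Int) (x : String) : PySem.Dict String Int :=
  if hitCount T x = 0 then r else r.insert x (hitCount T x)

theorem innerA (x : String) (T : List String) (h : Int) (r : PySem.Dict String Int) :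
    T.foldl (fun st n => if PySem.Str.isIn x n then (st.1 + 1, st.2.insert x (st.1 + 1)) else st) (h, r)
      = (h + hitCount T x,
         if hitCount T x = 0 then r else r.insert x (h + hitCount T x)) := by
  induction T generalizing h r with
  | nil => simp [hitCount]
  | cons n T ih =>
    by_cases hn : PySem.Str.isIn x n = true
    · have hc : hitCount (n :: T) x = hitCount T x + 1 := by
        simp only [hitCount, List.countP_cons, hn, if_true]
        push_cast; ring
      have h1 : ¬ (hitCount T x + 1 = 0) := by
        have := hitCount_nonneg T x; omega
      simp only [List.foldl_cons, hn, if_true]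
      rw [ih (h+1) (r.insert x (h+1)), hc]
      by_cases h0 : hitCount T x = 0
      · simp only [h0, if_true, add_zero]
        norm_num
      · simp only [h0, if_false, h1]
        have e1 : h + 1 + hitCount T x = h + (hitCount T x + 1) := by ring
        rw [PySem.Dict.insert_insert_self, e1]
    · have hc : hitCount (n :: T) x = hitCount T x := by
        simp only [hitCount, List.countP_cons, hn]
        push_cast; ring
      simp only [List.foldl_cons, hn, if_false, Bool.false_eq_true]
      rw [ih h r, hc]

theorem insert_self_of_get? (d : PySem.Dict String Int) (k : String) (v : Int)
    (hnd : d.keys.Nodup) (h : d.get? k = some v) : d.insert k v = d := by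
  have hc : d.contains k = true := by
    rw [PySem.Dict.contains_eq_isSome_get?, h]; rfl
  apply PySem.Dict.ext
  rw [PySem.Dict.items_insert_of_contains _ _ hc]
  have : ∀ p ∈ d.items, (if p.1 == k then (k, v) else p) = p := by
    intro p hp
    by_cases hpk : p.1 = k
    · have hmem : (k, p.2) ∈ d.items := by
        rw [← hpk]; exact hp
      have := PySem.Dict.get?_of_mem_items _ hmem hnd
      rw [h] at this
      have hv : p.2 = v := by injection this.symm
      rw [if_pos (show (p.1 == k) = true from beq_iff_eq.mpr hpk)]
      exact Prod.ext_iff.mpr ⟨hpk.symm, hv.symm⟩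
    · simp [hpk]
  rw [List.map_congr_left this]
  simp

theorem foldChar (T : List String) (l : List String) :
    (l.foldl (stepA T) PySem.Dict.empty).items
      = ((PySem.List.dedup l).filter (fun x => decide (hitCount T x ≠ 0))).map
          (fun x => (x, hitCount T x)) := by
  induction l using List.reverseRecOn with
  | nil => rfl
  | append_singleton l x ih =>
    have hded : PySem.List.dedup (l ++ [x])
        = if x ∈ l then PySem.List.dedup l else PySem.List.dedup l ++ [x] := by
      simp only [PySem.List.dedup_eq_ofList, PySem.Set.ofList_eq_foldl, List.foldl_append,
        List.foldl_cons, List.foldl_nil]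
      rw [← PySem.Set.ofList_eq_foldl]
      show PySem.Set.add _ x = _
      unfold PySem.Set.add
      by_cases hx : x ∈ l
      · rw [if_pos, if_pos hx]
        simp [PySem.Set.contains, PySem.Set.mem_ofList, hx]
      · rw [if_neg, if_neg hx]
        simp [PySem.Set.contains, PySem.Set.mem_ofList, hx]
    have keysEq : (l.foldl (stepA T) PySem.Dict.empty).keys
        = (PySem.List.dedup l).filter (fun x => decide (hitCount T x ≠ 0)) := by
      simp only [PySem.Dict.keys, ih, List.map_map]
      rw [show ((fun x : String × Int => x.1) ∘ fun x : String => (x, hitCount T x)) = id from rfl, List.map_id]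
    have nodupKeys : (l.foldl (stepA T) PySem.Dict.empty).keys.Nodup := by
      rw [keysEq]; exact (PySem.List.nodup_dedup l).filter _
    rw [List.foldl_append, List.foldl_cons, List.foldl_nil, hded]
    by_cases h0 : hitCount T x = 0
    · have hpx : (decide (hitCount T x ≠ 0)) = false := by simp [h0]
      have hstep : stepA T (l.foldl (stepA T) PySem.Dict.empty) x
          = l.foldl (stepA T) PySem.Dict.empty := by unfold stepA; rw [if_pos h0]
      rw [hstep]
      by_cases hx : x ∈ l
      · rw [if_pos hx]; exact ih
      · rw [if_neg hx, List.filter_append]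
        simp only [List.filter_cons, List.filter_nil, hpx, Bool.false_eq_true, if_false,
          List.append_nil]
        exact ih
    · have hpx : (decide (hitCount T x ≠ 0)) = true := by simp [h0]
      have hstep : stepA T (l.foldl (stepA T) PySem.Dict.empty) x
          = (l.foldl (stepA T) PySem.Dict.empty).insert x (hitCount T x) := by
        unfold stepA; rw [if_neg h0]
      rw [hstep]
      by_cases hx : x ∈ l
      · -- x already present with the same value: insert is the identity
        rw [if_pos hx]
        have hmemK : x ∈ (PySem.List.dedup l).filter (fun x => decide (hitCount T x ≠ 0)) := by
          rw [List.mem_filter]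
          exact ⟨(PySem.List.mem_dedup l x).2 hx, by simpa using h0⟩
        have hitems : (x, hitCount T x) ∈ (l.foldl (stepA T) PySem.Dict.empty).items := by
          rw [ih]
          exact List.mem_map.2 ⟨x, hmemK, rfl⟩
        have hget := PySem.Dict.get?_of_mem_items _ hitems nodupKeys
        rw [insert_self_of_get? _ _ _ nodupKeys hget]
        exact ih
      · rw [if_neg hx]
        have hnc : (l.foldl (stepA T) PySem.Dict.empty).contains x = false := by
          rw [PySem.Dict.contains_eq_decide_mem_keys, keysEq]
          simp only [decide_eq_false_iff_not, List.mem_filter]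
          intro ⟨hmem, _⟩
          exact hx ((PySem.List.mem_dedup l x).1 hmem)
        rw [PySem.Dict.items_insert_of_not_contains _ _ hnc, ih, List.filter_append]
        simp only [List.filter_cons, List.filter_nil, hpx, if_true, List.map_append,
          List.map_cons, List.map_nil]

theorem hitCount_cons_pos {x n : String} (T : List String) (h : PySem.Str.isIn x n = true) :
    hitCount (n :: T) x = hitCount T x + 1 := by
  simp only [hitCount, List.countP_cons, h, if_true]; push_cast; ring
theorem hitCount_cons_neg {x n : String} (T : List String) (h : ¬ PySem.Str.isIn x n = true) :
    hitCount (n :: T) x = hitCount T x := by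
  simp only [hitCount, List.countP_cons, h]; push_cast; ring

theorem foldl_insert_incr_get? (ks : List String) (hnd : ks.Nodup)
    (d : PySem.Dict String Int) (x : String) :
    (ks.foldl (fun d k => d.insert k (d.getD k 0 + 1)) d).get? x
      = if x ∈ ks then some (d.getD x 0 + 1) else d.get? x := by
  induction ks generalizing d with
  | nil => simp
  | cons k ks ih =>
    have hk : k ∉ ks := (List.nodup_cons.1 hnd).1
    have hnd' : ks.Nodup := (List.nodup_cons.1 hnd).2
    rw [List.foldl_cons, ih hnd']
    by_cases hxk : x = k
    · subst hxk
      rw [if_neg hk, if_pos (List.mem_cons_self ..), PySem.Dict.get?_insert_self]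
    · rw [PySem.Dict.get?_insert_of_ne _ _ hxk, PySem.Dict.getD_insert_of_ne _ _ _ hxk]
      by_cases hxm : x ∈ ks
      · rw [if_pos hxm, if_pos (List.mem_cons_of_mem _ hxm)]
      · rw [if_neg hxm, if_neg (by simp [hxk, hxm])]

-- a string is in the substring comprehension of n iff Python's 'x in n' holds
theorem mem_pySubs_iff (x n : String) : x ∈ pySubs n ↔ PySem.Str.isIn x n = true := by
  unfold pySubs
  rw [PySem.Str.isIn_iff_infix]
  constructor
  · intro hx
    rcases List.mem_flatMap.1 hx with ⟨i, hi, hx⟩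
    rcases List.mem_map.1 hx with ⟨j, hj, rfl⟩
    rcases (PySem.List.mem_pyRange_one).1 hi with ⟨hi0, _⟩
    rcases (PySem.List.mem_pyRange_one).1 hj with ⟨hij, _⟩
    have hj0 : 0 ≤ j := le_trans hi0 hij
    have htl : (PySem.Str.slice n (some i) (some j)).toList
        = List.take (j.toNat - i.toNat) (List.drop i.toNat n.toList) := by
      rw [PySem.Str.toList_slice, PySem.Chars.slice_eq_listSlice,
        PySem.List.slice_toNat _ hi0 hj0]
    rw [htl]
    exact List.infix_iff_prefix_suffix.2
      ⟨n.toList.drop i.toNat, List.take_prefix _ _, List.drop_suffix _ _⟩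
  · intro hinf
    rcases hinf with ⟨s, t, hst⟩
    have hlen : PySem.Str.len n = n.toList.length := PySem.Str.len_eq n
    have hslen : s.length + x.toList.length ≤ n.toList.length := by
      rw [← hst]; simp
    refine List.mem_flatMap.2 ⟨(s.length : Int), ?_, ?_⟩
    · rw [PySem.List.mem_pyRange_one, hlen]
      constructor
      · exact Int.natCast_nonneg _
      · have : (s.length : Int) ≤ (n.toList.length : Int) := by exact_mod_cast (by omega)
        omega
    · refine List.mem_map.2 ⟨(s.length : Int) + (x.toList.length : Int), ?_, ?_⟩
      · rw [PySem.List.mem_pyRange_one, hlen]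
        constructor
        · omega
        · have : (s.length : Int) + (x.toList.length : Int) ≤ (n.toList.length : Int) := by
            exact_mod_cast hslen
          omega
      · have hdrop : n.toList.drop s.length = x.toList ++ t := by
          rw [← hst, List.append_assoc, List.drop_left' rfl]
        have htl : (PySem.Str.slice n (some (s.length : Int))
            (some ((s.length : Int) + (x.toList.length : Int)))).toList = x.toList := by
          rw [PySem.Str.toList_slice, PySem.Chars.slice_eq_listSlice,
            PySem.List.slice_natCast_add, hdrop, List.take_left' rfl]
        exact String.toList_inj.mp htl

-- effect of one text's substring pass on one key
theorem perTextChar (blacklist : List String) (n : String)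
    (d : PySem.Dict String Int) (x : String) :
    ((PySem.Set.ofList (pySubs n)).foldl (fun d s =>
        if PySem.Set.contains (PySem.Set.ofList blacklist) s then d.insert s (d.getD s 0 + 1) else d) d).get? x
      = if x ∈ blacklist ∧ PySem.Str.isIn x n then some (d.getD x 0 + 1) else d.get? x := by
  have hsplit := PySem.List.foldl_if_eq_foldl_filter
    (fun s => PySem.Set.contains (PySem.Set.ofList blacklist) s)
    (fun (d : PySem.Dict String Int) s => d.insert s (d.getD s 0 + 1))
    (PySem.Set.ofList (pySubs n)) d
  rw [hsplit, foldl_insert_incr_get? _ ((PySem.Set.nodup_ofList _).filter _) d x]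
  have hmem : x ∈ (PySem.Set.ofList (pySubs n)).filter
      (fun s => PySem.Set.contains (PySem.Set.ofList blacklist) s)
      ↔ (x ∈ blacklist ∧ PySem.Str.isIn x n = true) := by
    rw [List.mem_filter, PySem.Set.mem_ofList, mem_pySubs_iff]
    constructor
    · intro ⟨h1, h2⟩
      refine ⟨?_, h1⟩
      simpa [PySem.Set.contains, PySem.Set.mem_ofList] using h2
    · intro ⟨h1, h2⟩
      refine ⟨h2, ?_⟩
      simp [PySem.Set.contains, PySem.Set.mem_ofList, h1]
  by_cases hc : x ∈ blacklist ∧ PySem.Str.isIn x n = true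
  · rw [if_pos (hmem.2 hc), if_pos hc]
  · rw [if_neg (fun h => hc (hmem.1 h)), if_neg hc]

set_option maxHeartbeats 1000000 in
theorem countsChar (blacklist : List String) (T : List String)
    (d : PySem.Dict String Int) (x : String) :
    (T.foldl (fun d n => (PySem.Set.ofList (pySubs n)).foldl (fun d s =>
        if PySem.Set.contains (PySem.Set.ofList blacklist) s then d.insert s (d.getD s 0 + 1) else d) d) d).get? x
      = if x ∈ blacklist ∧ hitCount T x ≠ 0 then some (d.getD x 0 + hitCount T x) else d.get? x := by
  induction T generalizing d with
  | nil => simp [hitCount]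
  | cons n T ih =>
    rw [List.foldl_cons, ih]
    have hget := perTextChar blacklist n d x
    have hgetD : ((PySem.Set.ofList (pySubs n)).foldl (fun d s =>
        if PySem.Set.contains (PySem.Set.ofList blacklist) s then d.insert s (d.getD s 0 + 1) else d) d).getD x 0
        = if x ∈ blacklist ∧ PySem.Str.isIn x n then d.getD x 0 + 1 else d.getD x 0 := by
      rw [PySem.Dict.getD_eq_get?_getD, hget]
      by_cases hm : x ∈ blacklist ∧ PySem.Str.isIn x n = true
      · rw [if_pos hm, if_pos hm]; rfl
      · rw [if_neg hm, if_neg hm, ← PySem.Dict.getD_eq_get?_getD]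
    set F := (PySem.Set.ofList (pySubs n)).foldl (fun d s =>
        if PySem.Set.contains (PySem.Set.ofList blacklist) s then d.insert s (d.getD s 0 + 1) else d) d with hF
    by_cases hmem : x ∈ blacklist
    · by_cases hin : PySem.Str.isIn x n = true
      · have hc := hitCount_cons_pos T hin
        have hgD : F.getD x 0 = d.getD x 0 + 1 := by rw [hgetD, if_pos ⟨hmem, hin⟩]
        have hg : F.get? x = some (d.getD x 0 + 1) := by rw [hget, if_pos ⟨hmem, hin⟩]
        rw [hgD, hg, hc]
        have hcons0 : hitCount T x + 1 ≠ 0 := by have := hitCount_nonneg T x; omega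
        by_cases hT : hitCount T x = 0
        · rw [if_neg (fun hcc => hcc.2 hT), if_pos ⟨hmem, hcons0⟩, hT]
          norm_num
        · rw [if_pos ⟨hmem, hT⟩, if_pos ⟨hmem, hcons0⟩]
          congr 1; ring
      · have hc := hitCount_cons_neg T hin
        have hgD : F.getD x 0 = d.getD x 0 := by rw [hgetD, if_neg (fun hm => hin hm.2)]
        have hg : F.get? x = d.get? x := by rw [hget, if_neg (fun hm => hin hm.2)]
        rw [hgD, hg, hc]
    · have hg : F.get? x = d.get? x := by rw [hget, if_neg (fun hm => hmem hm.1)]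
      rw [if_neg (fun hm => hmem hm.1), hg, if_neg (fun hm => hmem hm.1)]

theorem dedup_dedup (l : List String) :
    PySem.List.dedup (PySem.List.dedup l) = PySem.List.dedup l := by
  simp only [PySem.List.dedup_eq_ofList]
  exact PySem.Set.ofList_eq_self_of_nodup _ (PySem.List.nodup_dedup l)

-- ===== VERDICT (by name: the statement is the Claim_ definition above) =====
theorem searchQueries_spec : Claim_equal_searchQueries := by
  intro queries blacklist _
  unfold Spec_searchQueries
  simp only [searchQueries, searchQueries_alt]
  set T : List String := (PySem.Dict.ofList queries).values.flatten with hT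
  have hndk := PySem.Dict.nodup_keys_ofList queries
  -- A's body for one pattern is stepA over the flattened texts
  have hA : (fun (result : PySem.Dict String Int) (x : String) =>
      ((PySem.Dict.ofList queries).keys.foldl (fun st i =>
          ((PySem.Dict.ofList queries).getD i []).foldl (fun st n =>
              if PySem.Str.isIn x n then (st.1 + 1, st.2.insert x (st.1 + 1)) else st) st)
        ((0 : Int), result)).2) = stepA T := by
    funext r x
    have hmap := List.foldl_map (f := fun i => (PySem.Dict.ofList queries).getD i [])
      (g := fun (st : Int × PySem.Dict String Int) ts => ts.foldl (fun st n =>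
        if PySem.Str.isIn x n then (st.1 + 1, st.2.insert x (st.1 + 1)) else st) st)
      (l := (PySem.Dict.ofList queries).keys) (init := ((0 : Int), r))
    rw [← hmap, ← PySem.Dict.values_eq_map_keys _ hndk [], ← List.foldl_flatten, ← hT,
      innerA x T 0 r]
    simp [stepA]
  rw [hA]
  -- B's counting pass is also a fold over the flattened texts
  rw [show ((PySem.Dict.ofList queries).values.foldl (fun (d : PySem.Dict String Int) texts =>
        texts.foldl (fun d n => (PySem.Set.ofList (pySubs n)).foldl (fun d s =>
            if PySem.Set.contains (PySem.Set.ofList blacklist) s then d.insert s (d.getD s 0 + 1) else d) d) d)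
      PySem.Dict.empty)
    = T.foldl (fun (d : PySem.Dict String Int) n => (PySem.Set.ofList (pySubs n)).foldl (fun d s =>
        if PySem.Set.contains (PySem.Set.ofList blacklist) s then d.insert s (d.getD s 0 + 1) else d) d) PySem.Dict.empty
    from (List.foldl_flatten).symm]
  -- B's emission step agrees with stepA on the (deduplicated) pattern list
  have hB : ∀ (r : PySem.Dict String Int) (x : String), x ∈ PySem.List.dedup blacklist →
      (if (T.foldl (fun (d : PySem.Dict String Int) n => (PySem.Set.ofList (pySubs n)).foldl (fun d s =>
            if PySem.Set.contains (PySem.Set.ofList blacklist) s then d.insert s (d.getD s 0 + 1) else d) d) PySem.Dict.empty).contains x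
       then r.insert x ((T.foldl (fun (d : PySem.Dict String Int) n => (PySem.Set.ofList (pySubs n)).foldl (fun d s =>
            if PySem.Set.contains (PySem.Set.ofList blacklist) s then d.insert s (d.getD s 0 + 1) else d) d) PySem.Dict.empty).getD x 0)
       else r) = stepA T r x := by
    intro r x hx
    have hxbl : x ∈ blacklist := (PySem.List.mem_dedup blacklist x).1 hx
    have hget := countsChar blacklist T PySem.Dict.empty x
    rw [PySem.Dict.getD_empty, PySem.Dict.get?_empty] at hget
    by_cases h0 : hitCount T x = 0
    · have hg : _ = (none : Option Int) := hget.trans (if_neg (fun hc => hc.2 h0))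
      rw [PySem.Dict.contains_eq_isSome_get?, hg]
      unfold stepA
      rw [if_pos h0]
      rfl
    · have hg : _ = some (0 + hitCount T x) := hget.trans (if_pos ⟨hxbl, h0⟩)
      rw [PySem.Dict.contains_eq_isSome_get?, hg, PySem.Dict.getD_eq_get?_getD, hg]
      unfold stepA
      rw [if_neg h0]
      norm_num
  have hBf := PySem.List.foldl_congr_mem (PySem.List.dedup blacklist) _ (stepA T)
    PySem.Dict.empty hB
  rw [hBf]
  rw [foldChar T blacklist, foldChar T (PySem.List.dedup blacklist), dedup_dedup]
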